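-- pv_equiv track=rewrite | github.com/minagshehata/DataStructAndAlgoND | Proj00/Task0.py | getTheLastRecordOfCalls
-- ===== SOURCE A (Python) =====
-- def parseTimestamp(timestamp) :
--     return timestamp.replace("-"," ").replace(":"," ").split(" ")
--
-- def compareTwoTimestamps(timestamp1,timestamp2):
--     ts_1 = parseTimestamp(timestamp1)
--     ts_2 = parseTimestamp(timestamp2)
--     for i in range(len(ts_1)):
--         if ts_1[i] < ts_2[i]:
--             return True
--         elif ts_1[i] > ts_2[i]:
--             return False
--     return True
--
-- def getTheLastRecordOfCalls(calls):
--     record = calls[0]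
--     lastTimestamp = calls[0][2]
--     # pick the most recent record using O(n) time comlpexity
--     for i in calls:
--         if compareTwoTimestamps(lastTimestamp,i[2]):
--             lastTimestamp = i[2]
--             record = i
--     return record
-- ===== SOURCE B (Python) =====
-- def parseTimestamp(timestamp):
--     return timestamp.replace("-", " ").replace(":", " ").split(" ")
--
-- def getTheLastRecordOfCalls(calls):
--     # stable ascending sort by parsed timestamp; the last element is the
--     # last-in-original-order record with the maximal timestamp, like A's scan
--     return sorted(calls, key=lambda c: parseTimestamp(c[2]))[-1]
-- ===== Notes on version B (the rewrite author's own statement) =====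
-- stated objective: simpler
-- what changed: Replaces the running-max scan (with its hand-written elementwise timestamp comparison loop) by a single stable ascending sort keyed on the parsed timestamp followed by taking the last element; stability makes the last element the last-in-order maximal record, exactly A's tie-breaking.
-- outside the precondition, e.g. on getTheLastRecordOfCalls([['', '', '1'], ['', '', '1 2']]): A returns ['', '', '1 2'], B returns ['', '', '1 2']
import Mathlib
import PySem

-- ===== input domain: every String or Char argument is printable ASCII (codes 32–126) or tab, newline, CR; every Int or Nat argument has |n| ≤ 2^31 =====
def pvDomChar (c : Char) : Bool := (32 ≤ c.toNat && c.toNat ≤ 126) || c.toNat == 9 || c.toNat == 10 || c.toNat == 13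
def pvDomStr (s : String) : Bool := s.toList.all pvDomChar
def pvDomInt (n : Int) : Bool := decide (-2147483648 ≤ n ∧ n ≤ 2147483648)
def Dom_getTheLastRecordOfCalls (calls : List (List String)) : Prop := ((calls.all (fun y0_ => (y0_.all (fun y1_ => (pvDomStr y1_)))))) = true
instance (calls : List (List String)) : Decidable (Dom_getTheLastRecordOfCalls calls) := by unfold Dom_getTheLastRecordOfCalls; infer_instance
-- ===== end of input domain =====

-- B replaces A's running-max scan by a stable ascending sort on the parsed timestamp
-- followed by taking the last element (objective: simpler one-liner, same results).

-- ===== PORT A =====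
-- shared helper: parseTimestamp (B's Python reuses the same helper).
-- split? is none only for an empty separator; the separator here is " " ≠ "", so getD is exact.
def parseTimestamp (t : String) : List String :=
  (PySem.Str.split? (PySem.Str.replace (PySem.Str.replace t "-" " ") ":" " ") " ").getD []

-- the for-loop of compareTwoTimestamps over i in range(len(ts_1)), reading ts_1[i] and ts_2[i];
-- when ts_2 is exhausted first Python raises IndexError (such inputs are outside Pre_).
def compareTwoLoop : List String → List String → Bool
  | [], _ => true
  | _ :: _, [] => true   -- Python: IndexError on ts_2[i]; excluded by Pre_
  | a :: r1, b :: r2 => if a < b then true else if b < a then false else compareTwoLoop r1 r2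

def compareTwoTimestamps (t1 t2 : String) : Bool :=
  compareTwoLoop (parseTimestamp t1) (parseTimestamp t2)

def getTheLastRecordOfCalls (calls : List (List String)) : List String :=
  match calls with
  | [] => []   -- Python: calls[0] raises IndexError; excluded by Pre_
  | c0 :: _ =>
    (calls.foldl
      (fun st i =>
        if compareTwoTimestamps st.2 ((PySem.List.pyGet? i 2).getD "") then
          (i, (PySem.List.pyGet? i 2).getD "")
        else st)
      (c0, (PySem.List.pyGet? c0 2).getD "")).1

-- ===== PORT B =====
-- B's sort key: parseTimestamp(c[2])  (c[2] in range for all admitted inputs)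
def pvKey (c : List String) : List String :=
  parseTimestamp ((PySem.List.pyGet? c 2).getD "")

def getTheLastRecordOfCalls_alt (calls : List (List String)) : List String :=
  (PySem.List.pyGet? (PySem.List.sorted calls pvKey false) (-1)).getD []

-- ===== PRECONDITION & SPEC =====
-- Pre_ excludes inputs where A raises: empty calls, a record with fewer than 3 fields, and
-- (conservatively) any pair of records one of whose parsed timestamps is a proper prefix of the
-- other's — on such pairs A's comparison loop can raise IndexError (when A happens to return
-- anyway on a prefix pair, B agrees with it; see cites).
def Pre_getTheLastRecordOfCalls (calls : List (List String)) : Prop :=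
  calls ≠ [] ∧ (∀ c ∈ calls, 3 ≤ c.length) ∧
  ∀ c ∈ calls, ∀ d ∈ calls, pvKey d <+: pvKey c → pvKey d = pvKey c
instance (calls : List (List String)) : Decidable (Pre_getTheLastRecordOfCalls calls) := by
  unfold Pre_getTheLastRecordOfCalls; infer_instance

def pvWitness_getTheLastRecordOfCalls : List (List String) :=
  [["a", "b", "1"], ["c", "d", "2"]]

def Spec_getTheLastRecordOfCalls (calls : List (List String)) (out : List String) : Prop :=
  out = getTheLastRecordOfCalls_alt calls
instance (calls : List (List String)) (out : List String) : Decidable (Spec_getTheLastRecordOfCalls calls out) := by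
  unfold Spec_getTheLastRecordOfCalls; infer_instance

-- ===== CLAIM (what is proved, stated in full; the proofs are below) =====
def Claim_equal_getTheLastRecordOfCalls : Prop :=
  ∀ (calls : List (List String)), Dom_getTheLastRecordOfCalls calls →
    Pre_getTheLastRecordOfCalls calls →
    Spec_getTheLastRecordOfCalls calls (getTheLastRecordOfCalls calls)

-- ===== LEMMAS AND PROOFS =====

-- proof-side abbreviations
def pvTs (c : List String) : String := (PySem.List.pyGet? c 2).getD ""
def pvG (b c : List String) : List String := if pvKey c < pvKey b then b else c
def pvLM : List (List String) → Option (List String)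
  | [] => none
  | x :: t => some (t.foldl pvG x)

theorem pv_cmp_eq (x y : List String) (h : y <+: x → y = x) :
    compareTwoLoop x y = !decide (y < x) := by
  induction x generalizing y with
  | nil =>
    have hn : ¬ y < ([] : List String) := fun hy => List.not_lt_nil _ hy
    simp [compareTwoLoop, hn]
  | cons a r1 ih =>
    cases y with
    | nil => exact absurd (h List.nil_prefix) (by simp)
    | cons b r2 =>
      by_cases hab : a < b
      · have h1 : ¬ (b :: r2) < (a :: r1) := by
          rw [List.cons_lt_cons_iff]
          rintro (hba | ⟨hba, _⟩)
          · exact absurd hab (asymm hba)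
          · exact absurd hab (by simp [hba])
        simp [compareTwoLoop, hab, h1]
      · by_cases hba : b < a
        · have h1 : (b :: r2) < (a :: r1) := by
            rw [List.cons_lt_cons_iff]; exact Or.inl hba
          simp [compareTwoLoop, hab, hba, h1]
        · have hEq : a = b := le_antisymm (not_lt.mp hba) (not_lt.mp hab)
          have h' : r2 <+: r1 → r2 = r1 := by
            intro hp
            have h2 := h (by rw [hEq]; exact List.cons_prefix_cons.mpr ⟨rfl, hp⟩)
            exact (List.cons_eq_cons.mp h2).2
          have h1 : ((b :: r2) < (a :: r1)) ↔ r2 < r1 := by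
            rw [List.cons_lt_cons_iff]
            constructor
            · rintro (hb | ⟨_, hr⟩)
              · exact absurd hb hba
              · exact hr
            · intro hr; exact Or.inr ⟨hEq.symm, hr⟩
          by_cases h2 : r2 < r1
          · simp [compareTwoLoop, hab, hba, ih r2 h', h1, h2]
          · simp [compareTwoLoop, hab, hba, ih r2 h', h1, h2]

theorem pv_foldA (calls : List (List String))
    (hP : ∀ c ∈ calls, ∀ d ∈ calls, pvKey d <+: pvKey c → pvKey d = pvKey c) :
    ∀ (rest : List (List String)), (∀ c ∈ rest, c ∈ calls) → ∀ b ∈ calls,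
      rest.foldl
        (fun st i => if compareTwoTimestamps st.2 (pvTs i) then (i, pvTs i) else st)
        (b, pvTs b)
      = (rest.foldl pvG b, pvTs (rest.foldl pvG b)) := by
  intro rest
  induction rest with
  | nil => intro _ b _; rfl
  | cons c t ih =>
    intro hsub b hb
    have hc : c ∈ calls := hsub c (by simp)
    have hcmp : compareTwoTimestamps (pvTs b) (pvTs c) = !decide (pvKey c < pvKey b) :=
      pv_cmp_eq (pvKey b) (pvKey c) (hP b hb c hc)
    have hsub' : ∀ x ∈ t, x ∈ calls := fun x hx => hsub x (by simp [hx])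
    by_cases hlt : pvKey c < pvKey b
    · have hfalse : compareTwoTimestamps (pvTs b) (pvTs c) = false := by simp [hcmp, hlt]
      simp only [List.foldl_cons, hfalse, Bool.false_eq_true, if_false,
        show pvG b c = b from by simp [pvG, hlt]]
      exact ih hsub' b hb
    · have htrue : compareTwoTimestamps (pvTs b) (pvTs c) = true := by simp [hcmp, hlt]
      simp only [List.foldl_cons, htrue, if_true,
        show pvG b c = c from by simp [pvG, hlt]]
      exact ih hsub' c hc

theorem pv_lm_append (l : List (List String)) (x : List String) :
    pvLM (l ++ [x]) = some (match pvLM l with | none => x | some b => pvG b x) := by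
  cases l with
  | nil => rfl
  | cons y t => simp [pvLM, List.foldl_append]

theorem pv_ins_last (bf : List String → List String → Bool)
    (hbf : ∀ a b, bf a b = true ↔ pvKey a < pvKey b)
    (s : List (List String)) (x : List String)
    (hs : s.Pairwise (fun a b => pvKey a ≤ pvKey b)) :
    (PySem.List.insertBy bf x s).getLast?
      = some (match s.getLast? with | none => x | some b => pvG b x) := by
  induction s with
  | nil => rfl
  | cons y t ih =>
    rw [List.pairwise_cons] at hs
    by_cases hxy : pvKey x < pvKey y
    · have hb : bf x y = true := (hbf x y).mpr hxy
      have hins : PySem.List.insertBy bf x (y :: t) = x :: y :: t := by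
        simp [PySem.List.insertBy, hb]
      obtain ⟨b, hbl⟩ := Option.isSome_iff_exists.mp
        (List.getLast?_isSome.mpr (by simp : (y :: t) ≠ []))
      have hmem : b ∈ y :: t := List.mem_of_getLast? hbl
      have hyb : pvKey y ≤ pvKey b := by
        rcases List.mem_cons.mp hmem with h | h
        · rw [h]
        · exact hs.1 _ h
      have hxb : pvKey x < pvKey b := lt_of_lt_of_le hxy hyb
      rw [hins, List.getLast?_cons_cons, hbl]
      simp [pvG, hxb]
    · have hb : bf x y = false := by
        rw [← Bool.not_eq_true, hbf]; exact hxy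
      have hins : PySem.List.insertBy bf x (y :: t) = y :: PySem.List.insertBy bf x t := by
        simp [PySem.List.insertBy, hb]
      rw [hins]
      cases t with
      | nil => simp [PySem.List.insertBy, pvG, hxy]
      | cons z t' =>
        cases hsp : PySem.List.insertBy bf x (z :: t') with
        | nil =>
          exact absurd hsp (by simp only [PySem.List.insertBy]; split <;> simp)
        | cons w ws =>
          rw [List.getLast?_cons_cons, ← hsp, ih hs.2, List.getLast?_cons_cons]

-- bridges the two (propositionally equal) order instances on List String between
-- PySem.List.sorted_pairwise's statement and the elaboration used in the ports
theorem pv_sorted_inst {α κ : Type} (i1 i2 : LT κ) (d1 : @DecidableLT κ i1) (d2 : @DecidableLT κ i2)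
    (h : ∀ a b : κ, @LT.lt κ i1 a b ↔ @LT.lt κ i2 a b) (l : List α) (key : α → κ) :
    @PySem.List.sorted α κ i1 d1 l key false = @PySem.List.sorted α κ i2 d2 l key false := by
  rw [@PySem.List.sorted_eq_foldl_insertBy α κ i1 d1, @PySem.List.sorted_eq_foldl_insertBy α κ i2 d2]
  congr 1
  funext acc x
  congr 1
  funext a b
  exact decide_eq_decide.mpr (h _ _)

theorem pv_sorted_pairwise' (l : List (List String)) :
    (PySem.List.sorted l pvKey false).Pairwise (fun a b => pvKey a ≤ pvKey b) := by
  have h := PySem.List.sorted_pairwise l pvKey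
  rwa [pv_sorted_inst _ _ _ _ (fun a b => Iff.rfl)] at h

theorem pv_sorted_last (l : List (List String)) :
    (PySem.List.sorted l pvKey false).getLast? = pvLM l := by
  induction l using List.reverseRecOn with
  | nil => rfl
  | append_singleton l x ih =>
    have hstep : PySem.List.sorted (l ++ [x]) pvKey false
        = PySem.List.insertBy (fun a b => decide (pvKey a < pvKey b)) x
            (PySem.List.sorted l pvKey false) := by
      rw [PySem.List.sorted_eq_foldl_insertBy, PySem.List.sorted_eq_foldl_insertBy,
        List.foldl_append, List.foldl_cons, List.foldl_nil]
    rw [hstep]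
    have hlast := pv_ins_last (fun a b => decide (pvKey a < pvKey b)) (fun a b => decide_eq_true_iff)
      (PySem.List.sorted l pvKey false) x (pv_sorted_pairwise' l)
    rw [hlast, ih, pv_lm_append]

theorem pv_pyGet_neg_one {α : Type} (s : List α) (h : s ≠ []) :
    PySem.List.pyGet? s (-1) = s.getLast? := by
  have hlen : 0 < s.length := List.length_pos_iff.mpr h
  have h1 : ¬ ((0 : Int) ≤ -1) := by norm_num
  have h2 : -((s.length : Nat) : Int) ≤ -1 := by omega
  rw [List.getLast?_eq_getElem?]
  simp only [PySem.List.pyGet?, PySem.List.pyIdx?, if_neg h1, if_pos h2]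
  norm_num

-- ===== VERDICT (by name: the statement is the Claim_ definition above) =====
theorem getTheLastRecordOfCalls_spec : Claim_equal_getTheLastRecordOfCalls := by
  intro calls _ hpre
  obtain ⟨hne, _, hP⟩ := hpre
  unfold Spec_getTheLastRecordOfCalls
  cases calls with
  | nil => exact absurd rfl hne
  | cons c0 rest =>
    have hAside : getTheLastRecordOfCalls (c0 :: rest) = rest.foldl pvG c0 := by
      unfold getTheLastRecordOfCalls
      simp only [List.foldl_cons]
      rw [ite_self]
      exact congrArg Prod.fst
        (pv_foldA (c0 :: rest) hP rest (fun x hx => by simp [hx]) c0 (by simp))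
    have hBside : getTheLastRecordOfCalls_alt (c0 :: rest) = rest.foldl pvG c0 := by
      unfold getTheLastRecordOfCalls_alt
      have hsne : PySem.List.sorted (c0 :: rest) pvKey false ≠ [] := by
        rw [Ne, PySem.List.sorted_eq_nil_iff]; simp
      rw [pv_pyGet_neg_one _ hsne, pv_sorted_last]
      rfl
    rw [hAside, hBside]
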